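-- pv_equiv track=rewrite | github.com/oimus1976/reiki-rag-converter | scripts/compare_answers.py | compute_volume_metrics
-- ===== SOURCE A (Python) =====
-- def compute_volume_metrics(text: str) -> dict:
--     # chars: Unicode code points
--     chars = len(text)
--
--     # lines: splitlines() は末尾改行の過剰カウントを避ける
--     lines = len(text.splitlines())
--
--     # paragraphs: 空行区切りの非空行ブロック
--     count = 0
--     in_block = False
--     for line in text.splitlines():
--         if line.strip() == "":
--             if in_block:
--                 count += 1
--                 in_block = False
--         else:
--             in_block = True
--     if in_block:
--         count += 1
--
--     return {
--         "chars": chars,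
--         "lines": lines,
--         "paragraphs": count,
--     }
-- ===== SOURCE B (Python) =====
-- def compute_volume_metrics(text: str) -> dict:
--     ls = text.splitlines()
--     blanks = [not line.strip() for line in ls]
--     # a paragraph starts at each non-blank line whose predecessor is blank
--     # (a virtual blank line precedes the first line)
--     paragraphs = sum(1 for prev, cur in zip([True] + blanks, blanks) if prev and not cur)
--     return {
--         "chars": len(text),
--         "lines": len(ls),
--         "paragraphs": paragraphs,
--     }
-- ===== Notes on version B (the rewrite author's own statement) =====
-- stated objective: simpler
-- what changed: Replaces the stateful in_block loop plus trailing fix-up by a stateless count of blank-to-non-blank transitions over zip of the blank-flags list with itself shifted by one (each paragraph is counted at its first line instead of after its last).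
import Mathlib
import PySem

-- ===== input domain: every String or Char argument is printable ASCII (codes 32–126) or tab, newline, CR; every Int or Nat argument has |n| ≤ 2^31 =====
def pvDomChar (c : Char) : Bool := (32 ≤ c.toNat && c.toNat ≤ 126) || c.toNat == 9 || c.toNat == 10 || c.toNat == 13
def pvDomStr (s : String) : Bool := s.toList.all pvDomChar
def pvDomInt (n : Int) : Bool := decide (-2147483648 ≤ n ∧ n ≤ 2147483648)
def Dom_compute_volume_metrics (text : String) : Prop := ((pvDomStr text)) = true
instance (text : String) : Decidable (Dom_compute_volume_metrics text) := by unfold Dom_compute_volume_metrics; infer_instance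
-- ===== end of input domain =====

-- B replaces A's stateful in_block loop (with trailing fix-up) by a stateless count of
-- blank-to-non-blank transitions (each paragraph counted at its first line): simpler decomposition.


-- ===== PORT A =====
-- one loop iteration over state (count, in_block)
def pvStepA (st : Int × Bool) (line : String) : Int × Bool :=
  if PySem.Str.strip line == "" then
    if st.2 then (st.1 + 1, false) else st
  else (st.1, true)

def compute_volume_metrics (text : String) : List (String × Int) :=
  let chars : Int := PySem.Str.len text
  let lines : Int := PySem.List.len (PySem.Str.splitlines text)
  let st := (PySem.Str.splitlines text).foldl pvStepA (0, false)
  let count : Int := if st.2 then st.1 + 1 else st.1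
  [("chars", chars), ("lines", lines), ("paragraphs", count)]

-- ===== PORT B =====
def compute_volume_metrics_alt (text : String) : List (String × Int) :=
  let ls := PySem.Str.splitlines text
  let blanks := ls.map (fun line => PySem.Str.strip line == "")
  let paragraphs : Int :=
    ((List.zip (true :: blanks) blanks).countP (fun p => p.1 && !p.2) : Nat)
  [("chars", PySem.Str.len text), ("lines", PySem.List.len ls), ("paragraphs", paragraphs)]

-- ===== PRECONDITION & SPEC =====
def Spec_compute_volume_metrics (text : String) (out : List (String × Int)) : Prop := out = compute_volume_metrics_alt text
instance (text : String) (out : List (String × Int)) : Decidable (Spec_compute_volume_metrics text out) := by unfold Spec_compute_volume_metrics; infer_instance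

-- ===== CLAIM (what is proved, stated in full; the proofs are below) =====
def Claim_equal_compute_volume_metrics : Prop := ∀ (text : String), Dom_compute_volume_metrics text → Spec_compute_volume_metrics text (compute_volume_metrics text)

-- ===== LEMMAS AND PROOFS =====

-- boolean step function: A's loop body after the line has been reduced to its blank-flag
def pvStepB (st : Int × Bool) (b : Bool) : Int × Bool :=
  if b then (if st.2 then (st.1 + 1, false) else st) else (st.1, true)

-- A's finalized count over a list of blank-flags equals the number of blank→non-blank
-- transitions, where the flag preceding the first element is !inb.
theorem pvCountA_eq_transitions (bs : List Bool) : ∀ (c : Int) (inb : Bool),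
    (if (bs.foldl pvStepB (c, inb)).2 then (bs.foldl pvStepB (c, inb)).1 + 1
     else (bs.foldl pvStepB (c, inb)).1)
    = c + (if inb then 1 else 0)
      + (((List.zip ((!inb) :: bs) bs).countP (fun p => p.1 && !p.2) : Nat) : Int) := by
  induction bs with
  | nil => intro c inb; cases inb <;> simp
  | cons b bs ih =>
    intro c inb
    cases b <;> cases inb <;>
      simp [List.foldl_cons, pvStepB, List.zip_cons_cons, ih] <;> ring

theorem compute_volume_metrics_eq (text : String) :
    compute_volume_metrics text = compute_volume_metrics_alt text := by
  unfold compute_volume_metrics compute_volume_metrics_alt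
  have hfold : (PySem.Str.splitlines text).foldl pvStepA (0, false)
      = ((PySem.Str.splitlines text).map (fun line => PySem.Str.strip line == "")).foldl
          pvStepB (0, false) := by
    rw [List.foldl_map]
    rfl
  simp only [hfold]
  have h := pvCountA_eq_transitions
      ((PySem.Str.splitlines text).map (fun line => PySem.Str.strip line == "")) 0 false
  simp only [Bool.not_false] at h
  simp [h]

-- ===== VERDICT (by name: the statement is the Claim_ definition above) =====
theorem compute_volume_metrics_spec : Claim_equal_compute_volume_metrics := by
  intro text _
  unfold Spec_compute_volume_metrics
  exact compute_volume_metrics_eq text
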